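-- pv_equiv track=rewrite | github.com/mehradliviyan/Data-Structures-and-Algorithms | CAs/CA2/Q3.py | splitByZeros
-- ===== SOURCE A (Python) =====
-- def splitByZeros(colors):
--     temp = []
--     colors2 = []
--     for item in colors:
--         if item == 0 and len(temp) != 0:
--             colors2.append(temp)
--             temp = []
--         else:
--             if item != 0:
--                 temp.append(item)
--
--     if temp:
--         colors2.append(temp)
--     return colors2
-- ===== SOURCE B (Python) =====
-- def splitByZeros(colors):
--     if not colors:
--         return []
--     if colors[0] == 0:
--         return splitByZeros(colors[1:])
--     i = 0
--     while i < len(colors) and colors[i] != 0: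
--         i += 1
--     return [colors[:i]] + splitByZeros(colors[i:])
-- ===== Notes on version B (the rewrite author's own statement) =====
-- stated objective: simpler
-- what changed: Replaced A's single-pass accumulator loop (temp buffer flushed on zeros plus a final flush) with a direct recursion on the list structure: skip a leading zero, otherwise cut off the leading nonzero run and recurse on the rest.
import Mathlib
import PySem

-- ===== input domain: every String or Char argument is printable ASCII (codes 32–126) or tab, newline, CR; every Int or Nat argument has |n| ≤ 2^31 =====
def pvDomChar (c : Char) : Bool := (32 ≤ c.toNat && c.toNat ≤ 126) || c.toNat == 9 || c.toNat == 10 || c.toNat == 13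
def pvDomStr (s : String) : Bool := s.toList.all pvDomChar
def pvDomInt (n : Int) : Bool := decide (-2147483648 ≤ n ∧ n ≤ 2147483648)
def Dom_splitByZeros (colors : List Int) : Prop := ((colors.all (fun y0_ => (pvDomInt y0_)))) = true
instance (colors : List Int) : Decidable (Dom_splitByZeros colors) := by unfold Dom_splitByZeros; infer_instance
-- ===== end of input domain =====

-- B replaces A's accumulator-and-flush loop by structural recursion on leading runs; objective: simpler.

-- ===== PORT A =====
-- A-side helper: the body of A's for-loop, acting on the state (temp, colors2)
def pvStepA (st : List Int × List (List Int)) (item : Int) : List Int × List (List Int) :=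
  if item = 0 ∧ st.1.length ≠ 0 then ([], st.2 ++ [st.1])
  else if item ≠ 0 then (st.1 ++ [item], st.2)
  else st

def splitByZeros (colors : List Int) : List (List Int) :=
  let st := colors.foldl pvStepA ([], [])
  if st.1.isEmpty then st.2 else st.2 ++ [st.1]

-- ===== PORT B =====
def splitByZeros_alt : List Int → List (List Int)
  | [] => []
  | x :: rest =>
    if x = 0 then splitByZeros_alt rest
    else (x :: rest.takeWhile (· ≠ 0)) :: splitByZeros_alt (rest.dropWhile (· ≠ 0))
termination_by xs => xs.length
decreasing_by
  · simp
  · exact Nat.lt_succ_of_le (List.length_dropWhile_le _ _)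

-- ===== PRECONDITION & SPEC =====
def Spec_splitByZeros (colors : List Int) (out : List (List Int)) : Prop := out = splitByZeros_alt colors
instance (colors : List Int) (out : List (List Int)) : Decidable (Spec_splitByZeros colors out) := by unfold Spec_splitByZeros; infer_instance

-- ===== CLAIM (what is proved, stated in full; the proofs are below) =====
def Claim_equal_splitByZeros : Prop := ∀ (colors : List Int), Dom_splitByZeros colors → Spec_splitByZeros colors (splitByZeros colors)

-- ===== LEMMAS AND PROOFS =====

-- the rest of A's computation, given the pending buffer `temp` (final flush included)
def pvRest (temp : List Int) : List Int → List (List Int)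
  | [] => if temp = [] then [] else [temp]
  | x :: rest =>
    if x = 0 then (if temp = [] then pvRest [] rest else temp :: pvRest [] rest)
    else pvRest (temp ++ [x]) rest

theorem alt_zero (rest : List Int) : splitByZeros_alt (0 :: rest) = splitByZeros_alt rest := by
  rw [splitByZeros_alt]; simp

theorem alt_run (x : Int) (rest : List Int) (hx : x ≠ 0) :
    splitByZeros_alt (x :: rest)
      = (x :: rest.takeWhile (· ≠ 0)) :: splitByZeros_alt (rest.dropWhile (· ≠ 0)) := by
  rw [splitByZeros_alt]; simp [hx]

theorem pvFold_eq (xs : List Int) : ∀ (temp : List Int) (acc : List (List Int)),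
    (let st := xs.foldl pvStepA (temp, acc)
     if st.1.isEmpty then st.2 else st.2 ++ [st.1]) = acc ++ pvRest temp xs := by
  induction xs with
  | nil =>
    intro temp acc
    simp only [List.foldl_nil, pvRest, List.isEmpty_iff]
    split_ifs <;> simp_all
  | cons x rest ih =>
    intro temp acc
    rw [List.foldl_cons]
    by_cases hx : x = 0
    · by_cases ht : temp = []
      · have hs : pvStepA (temp, acc) x = (temp, acc) := by simp [pvStepA, hx, ht]
        rw [hs, ih temp acc]
        simp [pvRest, hx, ht]
      · have hs : pvStepA (temp, acc) x = ([], acc ++ [temp]) := by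
          simp [pvStepA, hx, List.length_eq_zero_iff, ht]
        rw [hs, ih [] (acc ++ [temp])]
        simp [pvRest, hx, ht]
    · have hs : pvStepA (temp, acc) x = (temp ++ [x], acc) := by simp [pvStepA, hx]
      rw [hs, ih (temp ++ [x]) acc]
      simp [pvRest, hx]

theorem pvRest_eq (xs : List Int) : ∀ (temp : List Int),
    pvRest temp xs =
      if temp ++ xs.takeWhile (· ≠ 0) = [] then splitByZeros_alt (xs.dropWhile (· ≠ 0))
      else (temp ++ xs.takeWhile (· ≠ 0)) :: splitByZeros_alt (xs.dropWhile (· ≠ 0)) := by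
  induction xs with
  | nil =>
    intro temp
    simp only [pvRest, List.takeWhile_nil, List.dropWhile_nil, List.append_nil]
    rw [splitByZeros_alt]
  | cons x rest ih =>
    intro temp
    by_cases hx : x = 0
    · subst hx
      have hrest : pvRest [] rest = splitByZeros_alt rest := by
        rw [ih []]
        by_cases h : rest.takeWhile (· ≠ 0) = []
        · simp only [h, List.nil_append, if_pos rfl]
          cases rest with
          | nil => simp
          | cons y r =>
            have hy : y = 0 := by
              by_contra hy
              simp [List.takeWhile_cons, hy] at h
            subst hy
            simp [List.dropWhile_cons]
        · cases rest with
          | nil => simp at h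
          | cons y r =>
            have hy : y ≠ 0 := by
              intro hy; simp [List.takeWhile_cons, hy] at h
            simp [h, List.takeWhile_cons, hy, List.dropWhile_cons, alt_run y r hy]
      by_cases ht : temp = []
      · simp [pvRest, ht, List.takeWhile_cons, List.dropWhile_cons, hrest, alt_zero]
      · simp [pvRest, ht, List.takeWhile_cons, List.dropWhile_cons, hrest, alt_zero]
    · rw [show pvRest temp (x :: rest) = pvRest (temp ++ [x]) rest by simp [pvRest, hx]]
      rw [ih (temp ++ [x])]
      simp [List.takeWhile_cons, hx, List.dropWhile_cons]

-- ===== VERDICT (by name: the statement is the Claim_ definition above) =====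
theorem splitByZeros_spec : Claim_equal_splitByZeros := by
  intro colors _
  show splitByZeros colors = splitByZeros_alt colors
  have h := pvFold_eq colors [] []
  simp only [splitByZeros]
  rw [h, pvRest_eq colors []]
  simp only [List.nil_append]
  by_cases h0 : colors.takeWhile (· ≠ 0) = []
  · simp only [h0, if_pos rfl]
    cases colors with
    | nil => simp
    | cons y r =>
      have hy : y = 0 := by
        by_contra hy; simp [List.takeWhile_cons, hy] at h0
      subst hy
      simp [List.dropWhile_cons, alt_zero]
  · cases colors with
    | nil => simp at h0
    | cons y r =>
      have hy : y ≠ 0 := by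
        intro hy; simp [List.takeWhile_cons, hy] at h0
      simp [h0, List.takeWhile_cons, hy, List.dropWhile_cons, alt_run y r hy]
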